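-- pv_equiv track=rewrite | github.com/galmonacid/opera-uja-monitoring | lambda/api_public/lambda_function.py | filter_items_by_patterns
-- ===== SOURCE A (Python) =====
-- from fnmatch import fnmatchcase
--
-- def filter_items_by_patterns(items, rt_like_patterns):
--     if not rt_like_patterns:
--         return items
--     return [
--         item
--         for item in items
--         if any(matches_like_pattern(item.get("rt_id", ""), pattern) for pattern in rt_like_patterns)
--     ]
--
-- def matches_like_pattern(value, pattern):
--     translated = pattern.replace("%", "*").replace("_", "?")
--     return fnmatchcase(value, translated)
-- ===== SOURCE B (Python) =====
-- def filter_items_by_patterns(items, rt_like_patterns):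
--     if not rt_like_patterns:
--         return items
--     compiled = [_compile(p.replace("%", "*").replace("_", "?")) for p in rt_like_patterns]
--     return [item for item in items
--             if any(_match(toks, item.get("rt_id", "")) for toks in compiled)]
--
--
-- STAR = object()   # matches any sequence of characters
-- ANY = object()    # matches exactly one character
--
--
-- def _compile(pat):
--     # pattern -> token list: a run of '*' is one STAR, '?' is ANY,
--     # any other character stands for itself
--     toks, i, n = [], 0, len(pat)
--     while i < n:
--         c = pat[i]
--         if c == '*':
--             toks.append(STAR)
--             while i < n and pat[i] == '*':
--                 i += 1
--         elif c == '?':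
--             toks.append(ANY)
--             i += 1
--         else:
--             toks.append(c)
--             i += 1
--     return toks
--
--
-- def _match(toks, s):
--     # right-to-left DP: v[k] == (the remaining token suffix matches s[k:])
--     n = len(s)
--     v = [False] * n + [True]
--     for t in reversed(toks):
--         if True not in v:
--             return False
--         if t is STAR:
--             i = n - v[::-1].index(True)
--             v = [True] * (i + 1) + [False] * (n - i)
--         elif t is ANY:
--             v = v[1:] + [False]
--         else:
--             v = [x == t and b for x, b in zip(s, v[1:])] + [False]
--     return v[0]
-- ===== Notes on version B (the rewrite author's own statement) =====
-- stated objective: alternative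
-- what changed: B compiles each LIKE pattern once into a wildcard/literal token list and filters in one pass, matching each rt_id with an iterative right-to-left DP (no backtracking), instead of A's per-item, per-pattern fnmatchcase call that re-translates the pattern to a regex every time; Pre_ excludes patterns containing '[', which A's fnmatch translation may read as a character class while B's two-wildcard matcher reads it literally (either reading of '[' is defensible for LIKE patterns).
-- outside the precondition, e.g. on filter_items_by_patterns([{'rt_id': 'a'}], ['[a]']): A returns [{'rt_id': 'a'}], B returns []; on filter_items_by_patterns([{'rt_id': '[a]'}], ['[a]']): A returns [], B returns [{'rt_id': '[a]'}]
import Mathlib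
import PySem

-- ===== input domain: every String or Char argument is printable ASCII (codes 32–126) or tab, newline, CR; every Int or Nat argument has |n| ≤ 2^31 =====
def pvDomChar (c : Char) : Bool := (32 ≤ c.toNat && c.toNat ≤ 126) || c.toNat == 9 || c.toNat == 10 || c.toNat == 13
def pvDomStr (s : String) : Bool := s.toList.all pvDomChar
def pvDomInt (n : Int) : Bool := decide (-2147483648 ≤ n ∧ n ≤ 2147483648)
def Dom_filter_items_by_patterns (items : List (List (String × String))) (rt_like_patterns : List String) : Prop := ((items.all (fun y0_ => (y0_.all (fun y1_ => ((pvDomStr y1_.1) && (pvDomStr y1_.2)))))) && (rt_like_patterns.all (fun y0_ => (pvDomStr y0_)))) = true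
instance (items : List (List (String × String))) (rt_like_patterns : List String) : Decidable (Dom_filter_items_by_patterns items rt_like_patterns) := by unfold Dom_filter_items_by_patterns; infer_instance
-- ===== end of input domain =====

-- B compiles each LIKE pattern once into a wildcard/literal token list and filters in one
-- pass with an iterative DP matcher, instead of A's per-item per-pattern fnmatchcase
-- (translate-to-regex) calls; equal on patterns without '[' (see Pre_ below).

-- Glob tokens for port A: the abstract form of what fnmatch.translate emits.  A character
-- class is its negation flag and the (lo, hi) ranges it admits; `never` is '(?!)'.
inductive Tok
  | star
  | any
  | never
  | lit (c : Char)
  | cls (neg : Bool) (items : List (Char × Char))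
deriving DecidableEq, Repr

-- ---- helpers of port A: fnmatch.translate's character-class analysis ----

-- scan for the closing ']' (translate's j-scan: '!' then ']' may be skipped first);
-- returns (class body, rest after ']'), or none when the '[' is unclosed
def pvScanTail (pre : List Char) (t : List Char) : Option (List Char × List Char) :=
  match t.dropWhile (· ≠ ']') with
  | [] => none
  | _ :: r => some (pre ++ t.takeWhile (· ≠ ']'), r)

def pvScanClose (cs : List Char) : Option (List Char × List Char) :=
  match cs with
  | '!' :: ']' :: t => pvScanTail ['!', ']'] t
  | '!' :: t => pvScanTail ['!'] t
  | ']' :: t => pvScanTail [']'] t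
  | t => pvScanTail [] t

-- split the body on range-forming '-': the first char (two if '!') is protected, and so
-- are the two chars following each split (translate's find(…) restarting at k+3)
def pvChunkGo : List Char → Nat → List Char → List (List Char)
  | [], _, cur => [cur.reverse]
  | c :: rest, prot, cur =>
    if c = '-' ∧ prot = 0 then cur.reverse :: pvChunkGo rest 2 []
    else pvChunkGo rest (prot - 1) (c :: cur)

-- an empty trailing chunk folds its '-' back into the previous chunk
def pvFixTrail : List (List Char) → List (List Char)
  | [] => []
  | [c] => [c]
  | [p, l] => if l = [] then [p ++ ['-']] else [p, l]
  | c :: rest => c :: pvFixTrail rest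

-- translate's right-to-left removal of empty ranges ("chunks[k-1][-1] > chunks[k][0]")
def pvMergeChunks : List (List Char) → List (List Char)
  | [] => []
  | c :: rest =>
    match pvMergeChunks rest with
    | [] => [c]
    | d :: ds =>
      match c.getLast?, d.head? with
      | some x, some y => if y < x then (c.dropLast ++ d.tail) :: ds else c :: d :: ds
      | _, _ => c :: d :: ds

def pvSplitChunks (body : List Char) : List (List Char) :=
  pvMergeChunks (pvFixTrail (pvChunkGo body (if body.head? = some '!' then 2 else 1) []))

-- the joined class content: chunk chars are literal (translate escapes their '-' and
-- '\'), the separators are the raw range-forming '-'s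
def pvMarked : List (List Char) → List (Char × Bool)
  | [] => []
  | [c] => c.map (fun x => (x, false))
  | c :: rest => c.map (fun x => (x, false)) ++ ('-', true) :: pvMarked rest

-- regex-class reading of the joined content: X raw'-' Y is the range (X, Y), anything
-- else is a literal (the port keeps ranges abstract; escaping is regex syntax only)
def pvReadItems : List (Char × Bool) → List (Char × Char)
  | [] => []
  | (x, _) :: ('-', true) :: (y, _) :: rest' => (x, y) :: pvReadItems rest'
  | (x, _) :: rest => (x, x) :: pvReadItems rest

-- translate's final branches: empty content → '(?!)', '!' → '.', leading '!' → negation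
def pvClassTok (chunks : List (List Char)) : Tok :=
  if chunks = [[]] then .never
  else if chunks = [['!']] then .any
  else
    match chunks with
    | ('!' :: c0) :: rest => .cls true (pvReadItems (pvMarked (c0 :: rest)))
    | _ => .cls false (pvReadItems (pvMarked chunks))

def pvClassOfBody (body : List Char) : Tok :=
  if body.contains '-' then pvClassTok (pvSplitChunks body) else pvClassTok [body]

-- c is admitted by the (un-negated) class items
def pvMemCls (items : List (Char × Char)) (c : Char) : Bool :=
  items.any (fun r => r.1 ≤ c && c ≤ r.2)

-- pattern.replace("%", "*").replace("_", "?") — done by both versions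
def pvLikeToGlob (p : String) : String :=
  PySem.Str.replace (PySem.Str.replace p "%" "*") "_" "?"

lemma pvScanTail_some_length {pre t body r : List Char}
    (h : pvScanTail pre t = some (body, r)) : r.length < t.length := by
  unfold pvScanTail at h
  rcases hd : t.dropWhile (· ≠ ']') with _ | ⟨z, zs⟩ <;> rw [hd] at h
  · simp at h
  · simp at h
    obtain ⟨-, rfl⟩ := h
    have := List.length_dropWhile_le (p := (· ≠ ']')) (l := t)
    rw [hd] at this
    simp at this
    omega

lemma pvScanClose_some_length {cs body r : List Char}
    (h : pvScanClose cs = some (body, r)) : r.length < cs.length := by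
  unfold pvScanClose at h
  split at h <;>
    (have := pvScanTail_some_length h; simp; omega)

-- ===== PORT A =====
-- A = fnmatchcase per item and pattern: translate the pattern (token form of the regex
-- translate emits — the '.*'/atomic-group assembly and re-escaping only affect regex
-- syntax, not the matched language) and run re.match, transcribed as a backtracking
-- matcher; '\Z'-anchored, '(?s)' so `any` admits newlines.

-- translate's main loop: res accumulator (kept reversed so that "res[-1] is STAR"
-- is a head test), consecutive '*' compressed via that last-element check
def pvTransGoA : List Char → List Tok → List Tok
  | [], acc => acc.reverse
  | c :: rest, acc =>
    if c = '*' then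
      pvTransGoA rest (if acc.head? = some Tok.star then acc else Tok.star :: acc)
    else if c = '?' then pvTransGoA rest (Tok.any :: acc)
    else if c = '[' then
      match h : pvScanClose rest with
      | none => pvTransGoA rest (Tok.lit '[' :: acc)      -- unclosed: literal '\['
      | some (body, r) => pvTransGoA r (pvClassOfBody body :: acc)
    else pvTransGoA rest (Tok.lit c :: acc)               -- re.escape(c): literal
  termination_by cs _ => cs.length
  decreasing_by
  · simp
  · simp
  · simp
  · exact Nat.lt_trans (pvScanClose_some_length h) (by simp)
  · simp

def pvTranslateA (p : String) : List Tok := pvTransGoA p.toList []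

-- re.match of the translated regex: backtracking over the token list
mutual
def pvMatchA : List Tok → List Char → Bool
  | [], s => s.isEmpty
  | .star :: ts, s => pvStarA ts s
  | .any :: ts, s =>
    match s with
    | [] => false
    | _ :: s' => pvMatchA ts s'
  | .lit c :: ts, s =>
    match s with
    | [] => false
    | x :: s' => x == c && pvMatchA ts s'
  | .cls neg items :: ts, s =>
    match s with
    | [] => false
    | x :: s' => (pvMemCls items x != neg) && pvMatchA ts s'
  | .never :: _, _ => false
  termination_by ts s => (s.length, ts.length, 1)

def pvStarA (ts : List Tok) : List Char → Bool
  | [] => pvMatchA ts []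
  | x :: s' => pvMatchA ts (x :: s') || pvStarA ts s'
  termination_by s => (s.length, ts.length + 1, 0)
end

def filter_items_by_patterns (items : List (List (String × String))) (rt_like_patterns : List String) : List (List (String × String)) :=
  match rt_like_patterns with
  | [] => items
  | _ =>
    items.filter (fun item =>
      rt_like_patterns.any (fun pattern =>
        pvMatchA (pvTranslateA (pvLikeToGlob pattern))
          (PySem.Dict.getD (PySem.Dict.mk item) "rt_id" "").toList))

-- ===== PORT B =====
-- B = compile every pattern once into a token list (a '*' run, '?', or a literal
-- character), then one pass over the items, each rt_id tested by a right-to-left DP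
-- over the token list (no backtracking).

inductive TokB
  | star
  | any
  | lit (c : Char)
deriving DecidableEq, Repr

-- Source B's _compile: direct recursion; a '*' run is consumed in one step
def pvTransB : List Char → List TokB
  | [] => []
  | c :: rest =>
    if c = '*' then .star :: pvTransB (rest.dropWhile (· = '*'))
    else if c = '?' then .any :: pvTransB rest
    else .lit c :: pvTransB rest
  termination_by cs => cs.length
  decreasing_by
  · exact Nat.lt_succ_of_le (List.length_dropWhile_le _ _)
  · simp
  · simp

-- Source B's _match: v[k] == "token suffix matches s[k:]", rebuilt right-to-left per token
def pvSufOr : List Bool → List Bool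
  | [] => []
  | b :: bs =>
    let r := pvSufOr bs
    (b || r.headD false) :: r

def pvStepB (s : List Char) (t : TokB) (v : List Bool) : List Bool :=
  match t with
  | .star => pvSufOr v
  | .any => v.tail ++ [false]
  | .lit c => List.zipWith (fun x b => x == c && b) s v.tail ++ [false]

-- Source B's loop over reversed(toks): "if True not in v: return False" is the early
-- exit (every step maps an all-False v to an all-False v)
def pvLoopB (s : List Char) : List TokB → List Bool → Bool
  | [], v => v.headD false
  | t :: ts, v => if v.any id then pvLoopB s ts (pvStepB s t v) else false

def pvMatchB (toks : List TokB) (s : List Char) : Bool :=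
  pvLoopB s toks.reverse (List.replicate s.length false ++ [true])

def filter_items_by_patterns_alt (items : List (List (String × String))) (rt_like_patterns : List String) : List (List (String × String)) :=
  match rt_like_patterns with
  | [] => items
  | _ =>
    let compiled := rt_like_patterns.map (fun p => pvTransB (pvLikeToGlob p).toList)
    items.filter (fun item =>
      compiled.any (fun toks =>
        pvMatchB toks (PySem.Dict.getD (PySem.Dict.mk item) "rt_id" "").toList))

-- ===== PRECONDITION & SPEC =====
-- Pre_ excludes patterns containing '[' although A returns a value on them: A's fnmatch
-- translation may read '[' as a character class while B's two-wildcard LIKE matcher reads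
-- it literally, and either reading of '[' in a LIKE pattern is defensible / unspecified.
def Pre_filter_items_by_patterns (items : List (List (String × String))) (rt_like_patterns : List String) : Prop :=
  ∀ p ∈ rt_like_patterns, '[' ∉ p.toList
instance (items : List (List (String × String))) (rt_like_patterns : List String) : Decidable (Pre_filter_items_by_patterns items rt_like_patterns) := by unfold Pre_filter_items_by_patterns; infer_instance

def pvWitness_filter_items_by_patterns : (List (List (String × String))) × List String :=
  ([[("rt_id", "abc")], [("rt_id", "zzz")]], ["a%", "_b_"])

def Spec_filter_items_by_patterns (items : List (List (String × String))) (rt_like_patterns : List String) (out : List (List (String × String))) : Prop := out = filter_items_by_patterns_alt items rt_like_patterns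
instance (items : List (List (String × String))) (rt_like_patterns : List String) (out : List (List (String × String))) : Decidable (Spec_filter_items_by_patterns items rt_like_patterns out) := by unfold Spec_filter_items_by_patterns; infer_instance

-- ===== CLAIM (what is proved, stated in full; the proofs are below) =====
def Claim_equal_filter_items_by_patterns : Prop := ∀ (items : List (List (String × String))) (rt_like_patterns : List String), Dom_filter_items_by_patterns items rt_like_patterns → Pre_filter_items_by_patterns items rt_like_patterns → Spec_filter_items_by_patterns items rt_like_patterns (filter_items_by_patterns items rt_like_patterns)

-- ===== LEMMAS AND PROOFS =====

-- B's tokens as A's tokens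
def embB : TokB → Tok
  | .star => .star
  | .any => .any
  | .lit c => .lit c

-- ---- the %/_ → */? replacement introduces no '[' ----

lemma replace_go_not_mem (old new : List Char) (c0 : Char) (hnew : c0 ∉ new) :
    ∀ (fuel : Nat) (l acc : List Char), c0 ∉ l → c0 ∉ acc →
      c0 ∉ PySem.Chars.replace.go old new fuel l acc := by
  intro fuel
  induction fuel with
  | zero =>
    intro l acc hl hacc
    rw [PySem.Chars.replace.go]
    simp [hl, hacc]
  | succ fuel ih =>
    intro l acc hl hacc
    cases l with
    | nil =>
      rw [PySem.Chars.replace.go]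
      · simpa using hacc
      · intro h; omega
    | cons c t =>
      rw [PySem.Chars.replace.go]
      split
      · apply ih
        · exact fun hm => hl (List.mem_of_mem_drop hm)
        · intro hm
          rcases List.mem_append.1 hm with h' | h'
          · exact hnew (List.mem_reverse.1 h')
          · exact hacc h'
      · apply ih
        · exact fun hm => hl (List.mem_cons_of_mem _ hm)
        · intro hm
          rcases List.mem_cons.1 hm with h' | h'
          · exact hl (h' ▸ List.mem_cons_self)
          · exact hacc h'

lemma replace_not_mem (cs old new : List Char) (c0 : Char)
    (hcs : c0 ∉ cs) (hnew : c0 ∉ new) : c0 ∉ PySem.Chars.replace cs old new := by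
  unfold PySem.Chars.replace
  split
  · intro hm
    simp [List.mem_flatMap] at hm
    rcases hm with h | ⟨x, hx, h⟩
    · exact hnew h
    · rcases h with h | h
      · exact hcs (h ▸ hx)
      · exact hnew h
  · exact replace_go_not_mem old new c0 hnew cs.length cs [] hcs (by simp)

lemma likeToGlob_no_lbr (p : String) (h : '[' ∉ p.toList) :
    '[' ∉ (pvLikeToGlob p).toList := by
  unfold pvLikeToGlob
  rw [PySem.Str.toList_replace, PySem.Str.toList_replace]
  exact replace_not_mem _ _ _ _
    (replace_not_mem _ _ _ _ h (by decide)) (by decide)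

-- ---- A's translate loop produces exactly B's token list on '['-free input ----

lemma pvTransB_star (rest : List Char) :
    pvTransB ('*' :: rest) = TokB.star :: pvTransB (rest.dropWhile (· = '*')) := by
  rw [pvTransB]; simp

lemma pvTransB_q (rest : List Char) :
    pvTransB ('?' :: rest) = TokB.any :: pvTransB rest := by
  rw [pvTransB]; simp

lemma pvTransB_other {c : Char} (rest : List Char) (h1 : ¬c = '*') (h2 : ¬c = '?') :
    pvTransB (c :: rest) = TokB.lit c :: pvTransB rest := by
  rw [pvTransB]; simp [h1, h2]

lemma dropWhile_star_cons {c : Char} (rest : List Char) (h : ¬c = '*') :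
    (c :: rest).dropWhile (· = '*') = c :: rest := by
  simp [h]

lemma transA_eq_transB : ∀ (cs : List Char) (acc : List Tok), '[' ∉ cs →
    pvTransGoA cs acc =
      acc.reverse ++ (if acc.head? = some Tok.star
        then (pvTransB (cs.dropWhile (· = '*'))).map embB
        else (pvTransB cs).map embB) := by
  intro cs acc
  induction cs, acc using pvTransGoA.induct with
  | case1 acc => intro _; simp [pvTransGoA, pvTransB]
  | case2 rest acc ih =>
    intro hcs
    have hrest : '[' ∉ rest := fun hm => hcs (List.mem_cons_of_mem _ hm)
    rw [pvTransGoA, if_pos rfl]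
    by_cases h : acc.head? = some Tok.star
    · simp only [h, reduceIte, dite_eq_ite] at ih ⊢
      rw [ih hrest, List.dropWhile_cons_of_pos (by simp)]
    · simp only [h, dite_eq_ite, reduceIte] at ih ⊢
      simp only [List.head?_cons] at ih
      rw [ih hrest, pvTransB_star]
      simp [embB]
  | case3 rest acc hq ih =>
    intro hcs
    have hrest : '[' ∉ rest := fun hm => hcs (List.mem_cons_of_mem _ hm)
    rw [pvTransGoA, if_neg (by decide), if_pos rfl, ih hrest]
    simp only [List.head?_cons, List.reverse_cons, List.append_assoc]
    rw [if_neg (by simp)]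
    split_ifs with h
    · rw [dropWhile_star_cons rest (by decide), pvTransB_q]; simp [embB]
    · rw [pvTransB_q]; simp [embB]
  | case4 rest acc h hne1 hne2 ih =>
    intro hcs
    exact absurd (List.mem_cons_self) hcs
  | case5 rest acc body r h hne1 hne2 ih =>
    intro hcs
    exact absurd (List.mem_cons_self) hcs
  | case6 c rest acc h1 h2 h3 ih =>
    intro hcs
    have hrest : '[' ∉ rest := fun hm => hcs (List.mem_cons_of_mem _ hm)
    rw [pvTransGoA, if_neg h1, if_neg h2, if_neg h3, ih hrest]
    simp only [List.head?_cons, List.reverse_cons, List.append_assoc]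
    rw [if_neg (by simp)]
    split_ifs with hh
    · rw [dropWhile_star_cons rest h1, pvTransB_other rest h1 h2]; simp [embB]
    · rw [pvTransB_other rest h1 h2]; simp [embB]

-- ---- the DP matcher computes A's backtracking matcher on every suffix ----

lemma base_tails (s : List Char) :
    s.tails.map (pvMatchA []) = List.replicate s.length false ++ [true] := by
  induction s with
  | nil => simp [pvMatchA]
  | cons x s' ih => simp [pvMatchA, ih, List.replicate_succ]

lemma head_tails_map (f : List Char → Bool) (s : List Char) :
    (s.tails.map f).headD false = f s := by
  cases s <;> simp [List.tails_cons]

lemma step_star (ts : List Tok) (s : List Char) :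
    pvSufOr (s.tails.map (pvMatchA ts)) = s.tails.map (pvMatchA (.star :: ts)) := by
  induction s with
  | nil => simp [pvSufOr, pvMatchA, pvStarA]
  | cons x s' ih =>
    simp only [List.tails_cons, List.map_cons, pvSufOr, ih]
    rw [head_tails_map]
    have h1 : pvMatchA (Tok.star :: ts) (x :: s') = pvStarA ts (x :: s') := by rw [pvMatchA]
    have h2 : pvMatchA (Tok.star :: ts) s' = pvStarA ts s' := by rw [pvMatchA]
    have h3 : pvStarA ts (x :: s') = (pvMatchA ts (x :: s') || pvStarA ts s') := by rw [pvStarA]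
    simp [h1, h2, h3]

lemma step_any (ts : List Tok) (s : List Char) :
    (s.tails.map (pvMatchA ts)).tail ++ [false] = s.tails.map (pvMatchA (.any :: ts)) := by
  induction s with
  | nil => simp [pvMatchA]
  | cons x s' ih =>
    simp only [List.tails_cons, List.map_cons, List.tail_cons]
    rw [show pvMatchA (.any :: ts) (x :: s') = pvMatchA ts s' from by rw [pvMatchA]]
    rw [← ih]
    cases s' <;> simp [List.tails_cons]

lemma step_lit (c : Char) (ts : List Tok) (s : List Char) :
    List.zipWith (fun x b => x == c && b) s (s.tails.map (pvMatchA ts)).tail ++ [false]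
      = s.tails.map (pvMatchA (.lit c :: ts)) := by
  induction s with
  | nil => simp [pvMatchA]
  | cons x s' ih =>
    simp only [List.tails_cons, List.map_cons, List.tail_cons]
    rw [show pvMatchA (.lit c :: ts) (x :: s') = (x == c && pvMatchA ts s') from by rw [pvMatchA]]
    have hhd : s'.tails.map (pvMatchA ts)
        = pvMatchA ts s' :: (s'.tails.map (pvMatchA ts)).tail := by
      cases s' <;> simp [List.tails_cons]
    rw [hhd]
    simp only [List.zipWith_cons_cons, List.cons_append]
    rw [ih]

lemma foldr_tails (toks : List TokB) (s : List Char) :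
    toks.foldr (pvStepB s) (List.replicate s.length false ++ [true])
      = s.tails.map (pvMatchA (toks.map embB)) := by
  induction toks with
  | nil => simp only [List.foldr_nil, List.map_nil]; exact (base_tails s).symm
  | cons t ts ih =>
    rw [List.foldr_cons, ih]
    simp only [List.map_cons]
    cases t with
    | star => exact step_star (ts.map embB) s
    | any => exact step_any (ts.map embB) s
    | lit c => exact step_lit c (ts.map embB) s

lemma headD_false_of_any_false {v : List Bool} (h : v.any id = false) :
    v.headD false = false := by
  cases v with
  | nil => rfl
  | cons b bs => simp at h; simp [h.1]

lemma pvSufOr_any_false {v : List Bool} (h : v.any id = false) :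
    (pvSufOr v).any id = false := by
  induction v with
  | nil => rfl
  | cons b bs ih =>
    simp at h
    have h2 : bs.any id = false := by simpa using h.2
    have h3 := ih h2
    have h4 := headD_false_of_any_false h3
    simp only [List.headD_eq_head?_getD] at h4
    simp [pvSufOr, h.1, h4] <;> simpa using h3

lemma zipWith_and_any_false (p : Char → Bool) (s : List Char) :
    ∀ {w : List Bool}, w.any id = false →
      (List.zipWith (fun x b => p x && b) s w).any id = false := by
  induction s with
  | nil => intro w _; simp
  | cons x s' ih =>
    intro w h
    cases w with
    | nil => simp
    | cons b bs =>
      simp at h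
      have h2 : bs.any id = false := by simpa using h.2
      simp [h.1] <;> simpa using ih h2

lemma tail_any_false {v : List Bool} (h : v.any id = false) : v.tail.any id = false := by
  cases v with
  | nil => rfl
  | cons b bs => simp at h; simp [h.2]

lemma pvStepB_any_false (s : List Char) (t : TokB) {v : List Bool}
    (h : v.any id = false) : (pvStepB s t v).any id = false := by
  cases t with
  | star => exact pvSufOr_any_false h
  | any => simp [pvStepB, tail_any_false h]
  | lit c => simp [pvStepB, zipWith_and_any_false _ s (tail_any_false h)]

lemma foldl_headD_false (s : List Char) (ts : List TokB) :
    ∀ {v : List Bool}, v.any id = false →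
      ((ts.foldl (fun v t => pvStepB s t v) v).headD false) = false := by
  induction ts with
  | nil => intro v h; exact headD_false_of_any_false h
  | cons t ts ih => intro v h; exact ih (pvStepB_any_false s t h)

lemma pvLoopB_eq_foldl (s : List Char) (ts : List TokB) :
    ∀ v, pvLoopB s ts v = (ts.foldl (fun v t => pvStepB s t v) v).headD false := by
  induction ts with
  | nil => intro v; rfl
  | cons t ts ih =>
    intro v
    rw [pvLoopB]
    by_cases h : v.any id = true
    · rw [if_pos h, ih]; rfl
    · rw [if_neg h, List.foldl_cons]
      exact (foldl_headD_false s ts (pvStepB_any_false s t (by simpa using h))).symm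

lemma matchB_eq_matchA (toks : List TokB) (s : List Char) :
    pvMatchB toks s = pvMatchA (toks.map embB) s := by
  unfold pvMatchB
  rw [pvLoopB_eq_foldl, List.foldl_reverse]
  show (toks.foldr (pvStepB s) _).headD false = _
  rw [foldr_tails, head_tails_map]

lemma any_congr_mem {α : Type} (l : List α) (f g : α → Bool)
    (h : ∀ x ∈ l, f x = g x) : l.any f = l.any g := by
  induction l with
  | nil => rfl
  | cons x xs ih =>
    simp only [List.any_cons, h x List.mem_cons_self,
      ih (fun y hy => h y (List.mem_cons_of_mem _ hy))]

-- ===== VERDICT (by name: the statement is the Claim_ definition above) =====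
theorem filter_items_by_patterns_spec : Claim_equal_filter_items_by_patterns := by
  intro items pats _ hpre
  unfold Spec_filter_items_by_patterns filter_items_by_patterns filter_items_by_patterns_alt
  cases pats with
  | nil => rfl
  | cons p ps =>
    apply List.filter_congr
    intro item _
    simp only [List.any_map]
    apply any_congr_mem
    intro pattern hmem
    simp only [Function.comp_apply]
    rw [matchB_eq_matchA]
    unfold pvTranslateA
    rw [transA_eq_transB _ _ (likeToGlob_no_lbr pattern (hpre pattern hmem))]
    simp
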